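-- pv_equiv track=rewrite | github.com/santaiscoming/algorithm-workbook | 백준/Bronze/1942. 디지털시계/디지털시계.py | convert_to_clock_time
-- ===== SOURCE A (Python) =====
-- def convert_to_clock_time(seconds):
--     seconds = seconds % (24 * 3600)
--
--     h = 0
--     while seconds >= 3600:
--         h += 1
--         seconds -= 3600
--
--     m = 0
--     while seconds >= 60:
--         m += 1
--         seconds -= 60
--
--     s = seconds
--
--     return h * 10000 + m * 100 + s
-- ===== SOURCE B (Python) =====
-- def convert_to_clock_time(seconds):
--     seconds %= 86400
--     h = seconds // 3600
--     m = seconds % 3600 // 60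
--     s = seconds % 60
--     return h * 10000 + m * 100 + s
-- ===== Notes on version B (the rewrite author's own statement) =====
-- stated objective: simpler
-- what changed: Replaces both repeated-subtraction while-loops with closed-form floor division/modulo after the same day-length normalization.
import Mathlib
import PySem

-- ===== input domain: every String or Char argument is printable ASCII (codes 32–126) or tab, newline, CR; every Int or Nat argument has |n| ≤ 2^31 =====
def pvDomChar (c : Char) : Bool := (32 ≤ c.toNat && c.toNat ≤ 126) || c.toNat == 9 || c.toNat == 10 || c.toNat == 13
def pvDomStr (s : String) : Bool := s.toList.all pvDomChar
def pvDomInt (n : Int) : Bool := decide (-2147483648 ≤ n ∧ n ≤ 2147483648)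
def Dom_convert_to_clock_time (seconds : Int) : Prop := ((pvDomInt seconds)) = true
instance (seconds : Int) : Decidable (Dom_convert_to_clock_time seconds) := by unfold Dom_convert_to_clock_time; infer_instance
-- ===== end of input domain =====

-- B replaces A's repeated-subtraction while-loops with closed-form floor division/modulo (simpler).


-- ===== PORT A =====
-- while seconds >= 3600: h += 1; seconds -= 3600   (returns (h, seconds))
def pvLoopH (seconds : Int) (h : Int) : Int × Int :=
  if _hs : seconds ≥ 3600 then pvLoopH (seconds - 3600) (h + 1) else (h, seconds)
termination_by seconds.toNat
decreasing_by omega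

-- while seconds >= 60: m += 1; seconds -= 60   (returns (m, seconds))
def pvLoopM (seconds : Int) (m : Int) : Int × Int :=
  if _hs : seconds ≥ 60 then pvLoopM (seconds - 60) (m + 1) else (m, seconds)
termination_by seconds.toNat
decreasing_by omega

def convert_to_clock_time (seconds : Int) : Int :=
  let seconds := PySem.Int.mod seconds (24 * 3600)
  let hm := pvLoopH seconds 0
  let ms := pvLoopM hm.2 0
  hm.1 * 10000 + ms.1 * 100 + ms.2

-- ===== PORT B =====
def convert_to_clock_time_alt (seconds : Int) : Int :=
  let seconds := PySem.Int.mod seconds 86400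
  let h := PySem.Int.floordiv seconds 3600
  let m := PySem.Int.floordiv (PySem.Int.mod seconds 3600) 60
  let s := PySem.Int.mod seconds 60
  h * 10000 + m * 100 + s

-- ===== PRECONDITION & SPEC =====
def Spec_convert_to_clock_time (seconds : Int) (out : Int) : Prop := out = convert_to_clock_time_alt seconds
instance (seconds : Int) (out : Int) : Decidable (Spec_convert_to_clock_time seconds out) := by unfold Spec_convert_to_clock_time; infer_instance

-- ===== CLAIM (what is proved, stated in full; the proofs are below) =====
def Claim_equal_convert_to_clock_time : Prop := ∀ (seconds : Int), Dom_convert_to_clock_time seconds → Spec_convert_to_clock_time seconds (convert_to_clock_time seconds)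

-- ===== LEMMAS AND PROOFS =====

theorem pvLoopH_eq (n : Nat) : ∀ s h : Int, 0 ≤ s → s.toNat ≤ n →
    pvLoopH s h = (h + s / 3600, s % 3600) := by
  induction n with
  | zero =>
    intro s h h0 hn
    rw [pvLoopH]
    have hs : s = 0 := by omega
    subst hs; simp
  | succ n ih =>
    intro s h h0 hn
    rw [pvLoopH]
    split
    · rw [ih (s - 3600) (h + 1) (by omega) (by omega)]
      simp only [Prod.mk.injEq]; omega
    · simp only [Prod.mk.injEq]; omega

theorem pvLoopM_eq (n : Nat) : ∀ s h : Int, 0 ≤ s → s.toNat ≤ n →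
    pvLoopM s h = (h + s / 60, s % 60) := by
  induction n with
  | zero =>
    intro s h h0 hn
    rw [pvLoopM]
    have hs : s = 0 := by omega
    subst hs; simp
  | succ n ih =>
    intro s h h0 hn
    rw [pvLoopM]
    split
    · rw [ih (s - 60) (h + 1) (by omega) (by omega)]
      simp only [Prod.mk.injEq]; omega
    · simp only [Prod.mk.injEq]; omega

-- ===== VERDICT (by name: the statement is the Claim_ definition above) =====
theorem convert_to_clock_time_spec : Claim_equal_convert_to_clock_time := by
  intro seconds _
  simp only [Spec_convert_to_clock_time, convert_to_clock_time, convert_to_clock_time_alt]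
  rw [PySem.Int.mod_eq_emod_of_pos (by norm_num : (0:Int) < 24 * 3600),
      PySem.Int.mod_eq_emod_of_pos (by norm_num : (0:Int) < 86400),
      PySem.Int.mod_eq_emod_of_pos (by norm_num : (0:Int) < 3600),
      PySem.Int.mod_eq_emod_of_pos (by norm_num : (0:Int) < 60),
      PySem.Int.floordiv_eq_ediv_of_pos (by norm_num : (0:Int) < 3600),
      PySem.Int.floordiv_eq_ediv_of_pos (by norm_num : (0:Int) < 60)]
  rw [show ((24:Int) * 3600) = 86400 by norm_num]
  set t := seconds % 86400 with ht
  have h0 : 0 ≤ t := Int.emod_nonneg _ (by norm_num)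
  rw [pvLoopH_eq t.toNat t 0 h0 le_rfl]
  have h0' : 0 ≤ t % 3600 := Int.emod_nonneg _ (by norm_num)
  rw [pvLoopM_eq (t % 3600).toNat (t % 3600) 0 h0' le_rfl]
  simp only [zero_add]
  omega
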